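-- pv_equiv track=rewrite | github.com/Faluminus/SecondaryStructure | scripts/buildDataset.py | ProcessDSSP
-- ===== SOURCE A (Python) =====
-- def ProcessDSSP(dsspData):
--     allData = ["",""]
--     lines = dsspData.splitlines()
--     i = False
--     for line in lines:
--
--         if i:
--             structure = line[16]
--             aminoacid = line[13]
--             allData[0] += aminoacid
--             allData[1] += structure
--
--         if line.startswith('  #'):
--             i = True
--
--
--     return allData
-- ===== SOURCE B (Python) =====
-- def ProcessDSSP(dsspData):
--     lines = dsspData.splitlines()
--     idx = next((k for k, l in enumerate(lines) if l.startswith('  #')), len(lines))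
--     tail = lines[idx + 1:]
--     return ["".join(l[13] for l in tail), "".join(l[16] for l in tail)]
-- ===== Notes on version B (the rewrite author's own statement) =====
-- stated objective: simpler
-- what changed: B locates the first ' #' marker line once (enumerate+next with a default) and maps over the suffix after it, instead of A's per-line boolean flag threaded through one big loop.
import Mathlib
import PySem

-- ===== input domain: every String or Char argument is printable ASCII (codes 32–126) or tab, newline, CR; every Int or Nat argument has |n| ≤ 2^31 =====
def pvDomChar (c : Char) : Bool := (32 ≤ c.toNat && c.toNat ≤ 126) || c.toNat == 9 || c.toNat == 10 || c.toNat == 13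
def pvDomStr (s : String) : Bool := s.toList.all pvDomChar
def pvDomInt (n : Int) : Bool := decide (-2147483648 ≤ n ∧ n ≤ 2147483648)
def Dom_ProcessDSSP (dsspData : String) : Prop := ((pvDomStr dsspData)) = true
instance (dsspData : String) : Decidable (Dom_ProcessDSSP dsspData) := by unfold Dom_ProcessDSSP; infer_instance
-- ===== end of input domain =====

-- B finds the first '  #' marker line once and maps over the suffix after it, instead of A's per-line boolean flag.

-- ===== PORT A =====
-- line[13] / line[16]: under Pre_ every processed line has length ≥ 17, so pyGet? is some; the getD default is unreachable there
def pvChar13 (line : String) : Char := (PySem.Str.pyGet? line 13).getD ' '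
def pvChar16 (line : String) : Char := (PySem.Str.pyGet? line 16).getD ' '

def pvStepA (st : Bool × List Char × List Char) (line : String) : Bool × List Char × List Char :=
  let st' := if st.1 then
      (st.1, st.2.1 ++ [pvChar13 line], st.2.2 ++ [pvChar16 line])
    else st
  if PySem.Str.startswith line "  #" then (true, st'.2) else st'

def ProcessDSSP (dsspData : String) : List String :=
  let lines := PySem.Str.splitlines dsspData
  let st := lines.foldl pvStepA (false, [], [])
  [String.ofList st.2.1, String.ofList st.2.2]

-- ===== PORT B =====
def ProcessDSSP_alt (dsspData : String) : List String :=
  let lines := PySem.Str.splitlines dsspData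
  let idx := lines.findIdx (fun l => PySem.Str.startswith l "  #")   -- = len(lines) when absent, like next's default
  let tail := lines.drop (idx + 1)
  [String.ofList (tail.map pvChar13), String.ofList (tail.map pvChar16)]

-- ===== PRECONDITION & SPEC =====
-- Pre_ excludes exactly the inputs on which Python A raises IndexError:
-- some line strictly after the first '  #' marker line is shorter than 17 characters.
def Pre_ProcessDSSP (dsspData : String) : Prop :=
  let lines := PySem.Str.splitlines dsspData
  ∀ k : Nat, k < lines.length →
    ((lines.take k).any (fun l => PySem.Str.startswith l "  #")) = true →
    17 ≤ (lines.getD k "").toList.length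
instance (dsspData : String) : Decidable (Pre_ProcessDSSP dsspData) := by unfold Pre_ProcessDSSP; infer_instance

def pvWitness_ProcessDSSP : String := "  # header\nXXXXXXXXXXXXXAXXH"

def Spec_ProcessDSSP (dsspData : String) (out : List String) : Prop := out = ProcessDSSP_alt dsspData
instance (dsspData : String) (out : List String) : Decidable (Spec_ProcessDSSP dsspData out) := by unfold Spec_ProcessDSSP; infer_instance

-- ===== CLAIM (what is proved, stated in full; the proofs are below) =====
def Claim_equal_ProcessDSSP : Prop := ∀ (dsspData : String), Dom_ProcessDSSP dsspData → Pre_ProcessDSSP dsspData → Spec_ProcessDSSP dsspData (ProcessDSSP dsspData)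

-- ===== LEMMAS AND PROOFS =====

-- once the flag is true, the fold appends the two extracted characters of every remaining line
theorem foldA_true (lines : List String) (a b : List Char) :
    lines.foldl pvStepA (true, a, b)
      = (true, a ++ lines.map pvChar13, b ++ lines.map pvChar16) := by
  induction lines generalizing a b with
  | nil => simp
  | cons l ls ih =>
      simp only [List.foldl_cons, pvStepA, List.map_cons]
      split <;> simp [ih, List.append_assoc]

-- starting with the flag down, the fold's accumulators are the maps over the suffix after the first marker
theorem foldA_false (lines : List String) :
    lines.foldl pvStepA (false, [], [])
      = (let tail := lines.drop (lines.findIdx (fun l => PySem.Str.startswith l "  #") + 1)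
         ((lines.findIdx (fun l => PySem.Str.startswith l "  #") < lines.length : Bool),
          tail.map pvChar13, tail.map pvChar16)) := by
  induction lines with
  | nil => simp
  | cons l ls ih =>
      simp only [List.foldl_cons, List.findIdx_cons, pvStepA, PySem.Str.startswith_eq] at *
      by_cases h : PySem.Chars.startswith l.toList [' ', ' ', '#'] = true
      · simp [h, foldA_true]
      · simp [h, ih, List.map_drop]

-- ===== VERDICT (by name: the statement is the Claim_ definition above) =====
theorem ProcessDSSP_spec : Claim_equal_ProcessDSSP := by
  intro dsspData _ _
  unfold Spec_ProcessDSSP ProcessDSSP ProcessDSSP_alt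
  simp [foldA_false]
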